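-- pv_equiv track=rewrite | github.com/nhungL/in-demand-job-skills | python/helpers/salary_helpers.py | search_payment_freq
-- ===== SOURCE A (Python) =====
-- def search_payment_freq(text):
--     payment_freq_units = ["annual", "year", "month", "hour"]
--     keywords = ['salary', 'base pay', 'pay rate', "compensation"]
--     pay_frequency = ""
--
--     text_with_salary = [line for line in text.split('\n') for word in keywords if word in line]
--     for line in text_with_salary:
--         for unit in payment_freq_units:
--             if unit in line:
--                 pay_frequency = unit
--     return pay_frequency
-- ===== SOURCE B (Python) =====
-- def search_payment_freq(text):
--     payment_freq_units = ["annual", "year", "month", "hour"]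
--     keywords = ['salary', 'base pay', 'pay rate', "compensation"]
--     for line in reversed(text.split('\n')):
--         if any(word in line for word in keywords):
--             for unit in reversed(payment_freq_units):
--                 if unit in line:
--                     return unit
--     return ""
-- ===== Notes on version B (the rewrite author's own statement) =====
-- stated objective: alternative
-- what changed: Replaces A's keyword-line comprehension plus forward accumulate-last-wins double loop by a single reverse scan of the lines that early-returns the last matching payment unit of the last keyword line containing one.
import Mathlib
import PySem

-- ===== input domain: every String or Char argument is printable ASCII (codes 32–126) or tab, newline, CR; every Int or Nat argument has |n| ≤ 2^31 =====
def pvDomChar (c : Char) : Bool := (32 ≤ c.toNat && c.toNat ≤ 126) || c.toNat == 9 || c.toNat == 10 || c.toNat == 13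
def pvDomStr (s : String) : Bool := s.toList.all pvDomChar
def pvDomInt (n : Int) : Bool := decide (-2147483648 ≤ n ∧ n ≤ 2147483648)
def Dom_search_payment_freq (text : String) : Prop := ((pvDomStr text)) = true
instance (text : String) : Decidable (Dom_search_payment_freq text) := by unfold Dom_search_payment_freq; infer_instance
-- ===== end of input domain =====

-- B replaces A's forward accumulate-last-wins over a keyword-line comprehension by a
-- reverse early-return scan of the lines (objective: alternative decomposition).

-- ===== PORT A =====
def pfUnits : List String := ["annual", "year", "month", "hour"]
def pfKeywords : List String := ["salary", "base pay", "pay rate", "compensation"]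

-- text.split('\n'): the separator is the nonempty literal "\n", so split? is always `some` (exact)
def pfSplitLines (text : String) : List String :=
  (PySem.Str.split? text "\n").getD []

def search_payment_freq (text : String) : String :=
  let text_with_salary :=
    (pfSplitLines text).flatMap (fun line =>
      (pfKeywords.filter (fun word => PySem.Str.isIn word line)).map (fun _ => line))
  text_with_salary.foldl
    (fun pay_frequency line =>
      pfUnits.foldl (fun pf unit => if PySem.Str.isIn unit line then unit else pf)
        pay_frequency)
    ""

-- ===== PORT B =====
-- `for unit in reversed(payment_freq_units): if unit in line: return unit`
def pfLastUnit (line : String) : Option String :=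
  pfUnits.reverse.find? (fun unit => PySem.Str.isIn unit line)

-- `for line in reversed(lines): …` with the early returns
def pfScan : List String → String
  | [] => ""
  | line :: rest =>
    if pfKeywords.any (fun word => PySem.Str.isIn word line) then
      match pfLastUnit line with
      | some unit => unit
      | none => pfScan rest
    else pfScan rest

def search_payment_freq_alt (text : String) : String :=
  pfScan (pfSplitLines text).reverse

-- ===== PRECONDITION & SPEC =====
def Spec_search_payment_freq (text : String) (out : String) : Prop := out = search_payment_freq_alt text
instance (text : String) (out : String) : Decidable (Spec_search_payment_freq text out) := by unfold Spec_search_payment_freq; infer_instance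

-- ===== CLAIM (what is proved, stated in full; the proofs are below) =====
def Claim_equal_search_payment_freq : Prop := ∀ (text : String), Dom_search_payment_freq text → Spec_search_payment_freq text (search_payment_freq text)

-- ===== LEMMAS AND PROOFS =====

/-- The step both programs take on one candidate line. -/
def pfM (line : String) : Option String :=
  if pfKeywords.any (fun word => PySem.Str.isIn word line) then pfLastUnit line else none

/-- A's inner unit loop is "last matching unit wins" = first match of the reversed list. -/
lemma inner_foldl (line : String) (pf : String) :
    pfUnits.foldl (fun pf unit => if PySem.Str.isIn unit line then unit else pf) pf
      = (pfLastUnit line).getD pf := by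
  simp only [pfUnits, pfLastUnit, List.reverse, List.reverseAux, List.foldl, List.find?]
  cases h1 : PySem.Str.isIn "annual" line <;>
    cases h2 : PySem.Str.isIn "year" line <;>
      cases h3 : PySem.Str.isIn "month" line <;>
        cases h4 : PySem.Str.isIn "hour" line <;> simp

/-- Generic: folding a step that ignores the element, when the step is idempotent. -/
lemma foldl_ignore_idem {α β : Type} (F : β → β) (idem : ∀ b, F (F b) = F b)
    (l : List α) (b : β) (hl : l ≠ []) :
    l.foldl (fun acc _ => F acc) b = F b := by
  induction l generalizing b with
  | nil => exact absurd rfl hl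
  | cons x xs ih =>
    cases xs with
    | nil => rfl
    | cons y ys => simpa [List.foldl] using (ih (F b) (by simp)).trans (idem b)

lemma getD_idem (o : Option String) (pf : String) :
    o.getD (o.getD pf) = o.getD pf := by cases o <;> rfl

/-- Folding A's inner loop over the keyword-filtered copies of one line. -/
lemma rep_foldl (line : String) (pf : String) :
    ((pfKeywords.filter (fun word => PySem.Str.isIn word line)).map (fun _ => line)).foldl
        (fun pay_frequency line =>
          pfUnits.foldl (fun pf unit => if PySem.Str.isIn unit line then unit else pf)
            pay_frequency) pf
      = (pfM line).getD pf := by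
  rw [List.foldl_map]
  unfold pfM
  cases h : pfKeywords.any (fun word => PySem.Str.isIn word line) with
  | false =>
    have hfil : pfKeywords.filter (fun word => PySem.Str.isIn word line) = [] := by
      rw [List.filter_eq_nil_iff]
      intro w hw
      simpa using List.any_eq_false.mp h w hw
    rw [hfil, List.foldl_nil, if_neg Bool.false_ne_true]
    rfl
  | true =>
    rw [if_pos rfl]
    have hne : pfKeywords.filter (fun word => PySem.Str.isIn word line) ≠ [] := by
      obtain ⟨w, hw, hpw⟩ := List.any_eq_true.mp h
      intro hnil
      have hmem : w ∈ pfKeywords.filter (fun word => PySem.Str.isIn word line) :=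
        List.mem_filter.mpr ⟨hw, hpw⟩
      rw [hnil] at hmem
      exact absurd hmem (List.not_mem_nil)
    calc (pfKeywords.filter (fun word => PySem.Str.isIn word line)).foldl
            (fun acc _ => pfUnits.foldl
              (fun pf unit => if PySem.Str.isIn unit line then unit else pf) acc) pf
        = pfUnits.foldl (fun pf unit => if PySem.Str.isIn unit line then unit else pf) pf := by
          refine foldl_ignore_idem _ (fun b => ?_) _ pf hne
          rw [inner_foldl, inner_foldl]
          exact getD_idem _ _
      _ = (pfLastUnit line).getD pf := inner_foldl line pf

/-- A's outer loop over all lines, as a fold of the per-line step `pfM`. -/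
lemma mainA (lines : List String) (pf : String) :
    (lines.flatMap (fun line =>
        (pfKeywords.filter (fun word => PySem.Str.isIn word line)).map (fun _ => line))).foldl
      (fun pay_frequency line =>
        pfUnits.foldl (fun pf unit => if PySem.Str.isIn unit line then unit else pf)
          pay_frequency) pf
      = lines.foldl (fun pf line => (pfM line).getD pf) pf := by
  induction lines generalizing pf with
  | nil => rfl
  | cons l rest ih =>
    rw [List.flatMap_cons, List.foldl_append, rep_foldl, List.foldl_cons, ih]

/-- "Last some wins" fold = first some of the reversed list. -/
lemma foldl_getD_eq_findSome (lines : List String) (pf : String) :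
    lines.foldl (fun pf line => (pfM line).getD pf) pf
      = (lines.reverse.findSome? pfM).getD pf := by
  induction lines generalizing pf with
  | nil => rfl
  | cons l rest ih =>
    rw [List.foldl_cons, List.reverse_cons, List.findSome?_append, ih]
    cases h : rest.reverse.findSome? pfM with
    | some v => simp
    | none => cases hm : pfM l <;> simp [hm, List.findSome?]

/-- B's reverse early-return scan is the first some of `pfM`. -/
lemma pfScan_eq (ys : List String) :
    pfScan ys = (ys.findSome? pfM).getD "" := by
  induction ys with
  | nil => rfl
  | cons l rest ih =>
    rw [pfScan, List.findSome?_cons]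
    cases h : pfKeywords.any (fun word => PySem.Str.isIn word l) with
    | false =>
      have hml : pfM l = none := by unfold pfM; rw [h]; rfl
      rw [if_neg Bool.false_ne_true, hml, ih]
    | true =>
      have hml : pfM l = pfLastUnit l := by unfold pfM; rw [h]; rfl
      rw [if_pos rfl, hml]
      cases hm : pfLastUnit l with
      | some u => rfl
      | none => exact ih

-- ===== VERDICT (by name: the statement is the Claim_ definition above) =====
theorem search_payment_freq_spec : Claim_equal_search_payment_freq := by
  intro text _
  unfold Spec_search_payment_freq search_payment_freq search_payment_freq_alt
  rw [mainA, foldl_getD_eq_findSome, pfScan_eq]
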